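-- pv_equiv track=rewrite | github.com/pypi-data/pypi-mirror-400 | packages/treesitter-chunker/treesitter_chunker-2.2.2-py3-none-any.whl/chunker/query_advanced.py | _find_keyword_highlights
-- ===== SOURCE A (Python) =====
-- def _find_keyword_highlights(
--     content: str,
--     keywords: list[str],
-- ) -> list[tuple[int, int]]:
--     """Find positions of keywords in content."""
--     highlights = []
--     content_lower = content.lower()
--     for keyword in keywords:
--         keyword_lower = keyword.lower()
--         start = 0
--         while True:
--             pos = content_lower.find(keyword_lower, start)
--             if pos == -1:
--                 break
--             highlights.append((pos, pos + len(keyword)))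
--             start = pos + 1
--     return highlights
-- ===== SOURCE B (Python) =====
-- def _find_keyword_highlights(
--     content: str,
--     keywords: list[str],
-- ) -> list[tuple[int, int]]:
--     """Find positions of keywords in content."""
--     content_lower = content.lower()
--     highlights = []
--     for keyword in keywords:
--         keyword_lower = keyword.lower()
--         k = len(keyword)
--         for i in range(len(content_lower) - k + 1):
--             if content_lower[i:i + k] == keyword_lower:
--                 highlights.append((i, i + k))
--     return highlights
-- ===== Notes on version B (the rewrite author's own statement) =====
-- stated objective: alternative
-- what changed: Replaces A's find-and-jump while loop (repeated str.find with start = pos + 1) by a per-keyword sliding-window scan over range(len(content) - len(keyword) + 1) comparing content_lower[i:i+k] against the lowered keyword; same grouped ascending positions.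
import Mathlib
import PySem

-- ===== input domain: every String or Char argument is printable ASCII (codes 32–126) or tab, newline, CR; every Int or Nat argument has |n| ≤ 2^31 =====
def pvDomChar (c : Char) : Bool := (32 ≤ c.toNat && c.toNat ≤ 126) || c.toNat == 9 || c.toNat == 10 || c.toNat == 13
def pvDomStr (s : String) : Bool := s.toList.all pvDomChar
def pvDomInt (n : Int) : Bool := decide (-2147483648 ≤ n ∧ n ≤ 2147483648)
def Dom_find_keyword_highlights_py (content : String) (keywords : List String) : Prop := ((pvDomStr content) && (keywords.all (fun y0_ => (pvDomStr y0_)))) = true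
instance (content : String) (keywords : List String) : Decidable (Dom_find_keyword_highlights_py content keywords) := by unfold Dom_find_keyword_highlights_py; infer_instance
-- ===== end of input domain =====

-- B replaces A's find-and-jump while loop by a per-keyword sliding-window scan
-- (compare content_lower[i:i+k] with the lowered keyword at every window start);
-- same values, same order — objective: alternative.

-- ===== PORT A =====
-- A's 'while True: pos = content_lower.find(keyword_lower, start); …; start = pos + 1' loop.
-- Ported with fuel cl.length + 1, which is always sufficient: every iteration moves start
-- to pos + 1 > start, and find returns -1 once start exceeds cl.length.
def pvLoopA (cl kw : List Char) (klen : Nat) : Nat → Nat → List (Int × Int) → List (Int × Int)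
  | 0, _, hs => hs
  | fuel+1, start, hs =>
    let pos := PySem.Chars.findFrom cl kw (start : Int) none
    if pos = -1 then hs
    else pvLoopA cl kw klen fuel (pos.toNat + 1) (hs ++ [(pos, pos + (klen : Int))])

def find_keyword_highlights_py (content : String) (keywords : List String) : List (Int × Int) :=
  let content_lower := PySem.Chars.lower content.toList
  keywords.foldl (fun hs keyword =>
    pvLoopA content_lower (PySem.Chars.lower keyword.toList) keyword.toList.length
      (content_lower.length + 1) 0 hs) []

-- ===== PORT B =====
-- B's inner loop 'for i in range(len(content_lower) - k + 1)': Python's range of a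
-- possibly negative bound is empty, which Nat subtraction 'cl.length + 1 - k' renders
-- exactly; the slice content_lower[i:i+k] with nonnegative in-order bounds is
-- (cl.drop i).take k (PySem.List.slice_natCast_add).
def find_keyword_highlights_py_alt (content : String) (keywords : List String) : List (Int × Int) :=
  let cl := PySem.Chars.lower content.toList
  keywords.foldl (fun highlights keyword =>
    let kl := PySem.Chars.lower keyword.toList
    let k := keyword.toList.length
    highlights ++ ((List.range (cl.length + 1 - k)).filter
        (fun i => (cl.drop i).take k == kl)).map
      (fun (i : Nat) => ((i : Int), (i : Int) + (k : Int)))) []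

-- ===== PRECONDITION & SPEC =====
def Spec_find_keyword_highlights_py (content : String) (keywords : List String) (out : List (Int × Int)) : Prop := out = find_keyword_highlights_py_alt content keywords
instance (content : String) (keywords : List String) (out : List (Int × Int)) : Decidable (Spec_find_keyword_highlights_py content keywords out) := by unfold Spec_find_keyword_highlights_py; infer_instance

-- ===== CLAIM (what is proved, stated in full; the proofs are below) =====
def Claim_equal_find_keyword_highlights_py : Prop := ∀ (content : String) (keywords : List String), Dom_find_keyword_highlights_py content keywords → Spec_find_keyword_highlights_py content keywords (find_keyword_highlights_py content keywords)

-- ===== LEMMAS AND PROOFS =====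

-- find(sub, start) is -1 once start is past the end of the string (CPython's rule).
theorem pvFindFrom_past (s sub : List Char) (k : Nat) (h : s.length < k) :
    PySem.Chars.findFrom s sub (k : Int) none = -1 := by
  simp [PySem.Chars.findFrom]; intro h1; omega

-- the filtered range is empty when the lower bound is past its end
theorem pvFilter_range_nil (N s : Nat) (m : Nat → Bool) (h : N ≤ s) :
    (List.range N).filter (fun i => decide (s ≤ i) && m i) = [] := by
  rw [List.filter_eq_nil_iff]
  intro i hi
  simp only [List.mem_range] at hi
  simp only [Bool.and_eq_true, decide_eq_true_eq, not_and]
  intro hsi; omega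

-- peeling the first match off a filtered range
theorem pvFilter_range_head (N s p : Nat) (m : Nat → Bool) (hsp : s ≤ p) (hpN : p < N)
    (hm : m p = true) (hmin : ∀ i, s ≤ i → i < p → m i = false) :
    (List.range N).filter (fun i => decide (s ≤ i) && m i)
      = p :: (List.range N).filter (fun i => decide (p + 1 ≤ i) && m i) := by
  induction N with
  | zero => omega
  | succ n ih =>
    rw [List.range_succ, List.filter_append, List.filter_append]
    by_cases hpn : p = n
    · subst hpn
      have h1 : (List.range p).filter (fun i => decide (s ≤ i) && m i) = [] := by
        rw [List.filter_eq_nil_iff]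
        intro i hi
        simp only [List.mem_range] at hi
        simp only [Bool.and_eq_true, decide_eq_true_eq, not_and]
        intro hsi
        rw [hmin i hsi hi]; simp
      have h2 : (List.range p).filter (fun i => decide (p + 1 ≤ i) && m i) = [] := by
        rw [List.filter_eq_nil_iff]
        intro i hi
        simp only [List.mem_range] at hi
        simp only [Bool.and_eq_true, decide_eq_true_eq, not_and]
        intro hsi; omega
      rw [h1, h2]
      simp [hsp, hm]
    · have hpn' : p < n := by omega
      rw [ih hpn']
      have h3 : (List.filter (fun i => decide (s ≤ i) && m i) [n])
          = List.filter (fun i => decide (p + 1 ≤ i) && m i) [n] := by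
        simp only [List.filter]
        have hs : decide (s ≤ n) = true := by simp; omega
        have hp : decide (p + 1 ≤ n) = true := by simp; omega
        rw [hs, hp]
      rw [h3, List.cons_append]

-- a prefix match at i ≥ start is an infix of cl.drop start
theorem pvPrefix_infix (cl kw : List Char) (s i : Nat) (hsi : s ≤ i)
    (h : kw <+: cl.drop i) : kw <:+: cl.drop s := by
  have hd : cl.drop i = (cl.drop s).drop (i - s) := by
    rw [List.drop_drop]; congr 1; omega
  rw [hd] at h
  exact (h.isInfix).trans (List.drop_suffix _ _).isInfix

-- A's find-jump loop enumerates exactly the match positions ≥ start, in ascending order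
theorem pvLoopA_eq (cl kw : List Char) (klen : Nat) :
    ∀ (fuel start : Nat) (hs : List (Int × Int)), cl.length + 1 ≤ start + fuel →
      pvLoopA cl kw klen fuel start hs
        = hs ++ ((List.range (cl.length + 1)).filter
              (fun i => decide (start ≤ i) && PySem.Chars.startswith (cl.drop i) kw)).map
            (fun (i : Nat) => ((i : Int), (i : Int) + (klen : Int))) := by
  intro fuel
  induction fuel with
  | zero =>
    intro start hs hle
    rw [pvLoopA, pvFilter_range_nil _ _ _ (by omega)]
    simp
  | succ f ih =>
    intro start hs hle
    rw [pvLoopA]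
    by_cases hpast : cl.length < start
    · rw [pvFindFrom_past cl kw start hpast]
      simp only [reduceIte]
      rw [pvFilter_range_nil _ _ _ (by omega)]
      simp
    · have hstart : start ≤ cl.length := by omega
      by_cases hneg : PySem.Chars.findFrom cl kw (start : Int) none = -1
      · simp only [hneg, reduceIte]
        have hni : ¬ kw <:+: cl.drop start :=
          (PySem.Chars.findFrom_natCast_eq_neg_one_iff cl kw start hstart).mp hneg
        have hfil : (List.range (cl.length + 1)).filter
            (fun i => decide (start ≤ i) && PySem.Chars.startswith (cl.drop i) kw) = [] := by
          rw [List.filter_eq_nil_iff]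
          intro i _
          simp only [Bool.and_eq_true, decide_eq_true_eq, not_and]
          intro hsi hsw
          exact hni (pvPrefix_infix cl kw start i hsi
            ((PySem.Chars.startswith_iff _ _).mp hsw))
        rw [hfil]; simp
      · simp only [hneg, if_false]
        obtain ⟨h1, h2, h3⟩ := PySem.Chars.findFrom_natCast_spec cl kw start hstart hneg
        set p := PySem.Chars.findFrom cl kw (start : Int) none with hp
        have hp0 : 0 ≤ p := le_trans (by exact_mod_cast Nat.zero_le start) h1
        have hps : start ≤ p.toNat := by omega
        have hplen : p.toNat ≤ cl.length := by
          by_contra hgt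
          rw [not_le] at hgt
          have hnil : cl.drop p.toNat = [] := List.drop_eq_nil_of_le (by omega)
          rw [hnil, List.prefix_nil] at h2
          have := h3 cl.length hstart (by omega)
          rw [h2] at this
          exact this (List.nil_prefix)
        have hcast : ((p.toNat : Nat) : Int) = p := Int.toNat_of_nonneg hp0
        rw [pvFilter_range_head (cl.length + 1) start p.toNat
            (fun i => PySem.Chars.startswith (cl.drop i) kw) hps (by omega)
            ((PySem.Chars.startswith_iff _ _).mpr h2)
            (fun i hsi hip => by
              have := h3 i hsi hip
              exact eq_false_of_ne_true (by
                intro hc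
                exact this ((PySem.Chars.startswith_iff _ _).mp hc)))]
        rw [List.map_cons, ih (p.toNat + 1) (hs ++ [(p, p + (klen : Int))]) (by omega)]
        rw [List.append_assoc]
        simp [hcast]

-- length is preserved by lower-casing
theorem pvLower_length (l : List Char) : (PySem.Chars.lower l).length = l.length := by
  simp [PySem.Chars.lower]

-- startswith at i is the window comparison B makes (k = the keyword's length)
theorem pvStartswith_eq_take (cl kl : List Char) (k i : Nat) (hk : kl.length = k) :
    PySem.Chars.startswith (cl.drop i) kl = ((cl.drop i).take k == kl) := by
  apply Bool.eq_iff_iff.mpr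
  rw [show (PySem.Chars.startswith (cl.drop i) kl = true) = (kl <+: cl.drop i) from
    propext (PySem.Chars.startswith_iff _ _), beq_iff_eq, List.prefix_iff_eq_take, hk]
  exact ⟨fun h => h.symm, fun h => h.symm⟩

-- a filter over a longer range may be truncated where the predicate is known false
theorem pvFilter_range_trunc (N M : Nat) (p : Nat → Bool) (hMN : M ≤ N)
    (hfalse : ∀ i, M ≤ i → i < N → p i = false) :
    (List.range N).filter p = (List.range M).filter p := by
  have hN : N = M + (N - M) := by omega
  rw [hN, List.range_add, List.filter_append]
  have h2 : (List.map (fun j => M + j) (List.range (N - M))).filter p = [] := by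
    rw [List.filter_eq_nil_iff]
    intro x hx
    simp only [List.mem_map, List.mem_range] at hx
    obtain ⟨j, hj, rfl⟩ := hx
    rw [hfalse (M + j) (by omega) (by omega)]
    simp
  rw [h2, List.append_nil]

-- ===== VERDICT (by name: the statement is the Claim_ definition above) =====
theorem find_keyword_highlights_py_spec : Claim_equal_find_keyword_highlights_py := by
  intro content keywords _
  unfold Spec_find_keyword_highlights_py find_keyword_highlights_py find_keyword_highlights_py_alt
  have hlen : (PySem.Chars.lower content.toList).length = content.toList.length :=
    pvLower_length _
  have hstep : (fun (hs : List (Int × Int)) (keyword : String) =>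
      pvLoopA (PySem.Chars.lower content.toList) (PySem.Chars.lower keyword.toList)
        keyword.toList.length ((PySem.Chars.lower content.toList).length + 1) 0 hs)
      = (fun (highlights : List (Int × Int)) (keyword : String) =>
      highlights ++ ((List.range ((PySem.Chars.lower content.toList).length + 1 - keyword.toList.length)).filter
          (fun i => ((PySem.Chars.lower content.toList).drop i).take keyword.toList.length == PySem.Chars.lower keyword.toList)).map
        (fun (i : Nat) => ((i : Int), (i : Int) + (keyword.toList.length : Int)))) := by
    funext hs keyword
    set cl := PySem.Chars.lower content.toList with hcl
    set kl := PySem.Chars.lower keyword.toList with hkl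
    set k := keyword.toList.length with hkv
    have hklen : kl.length = k := pvLower_length _
    rw [pvLoopA_eq _ _ _ _ 0 hs (by omega)]
    have hf : ∀ i ∈ List.range (cl.length + 1),
        (decide (0 ≤ i) && PySem.Chars.startswith (cl.drop i) kl)
          = ((cl.drop i).take k == kl) := by
      intro i _
      rw [pvStartswith_eq_take cl kl k i hklen]
      simp
    rw [List.filter_congr hf]
    rw [pvFilter_range_trunc (cl.length + 1) (cl.length + 1 - k)
        (fun i => (cl.drop i).take k == kl) (by omega)
        (fun i hMi hiN => by
          apply beq_eq_false_iff_ne.mpr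
          intro hc
          have h1 : ((cl.drop i).take k).length = min k (cl.length - i) := by simp
          rw [hc, hklen] at h1
          omega)]
  simp only []
  rw [hstep]
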